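-- pv_equiv track=rewrite | github.com/MrBrantCode/unitest_baseline | mut_generate/mist_train_taco/taco_7638/solution.py | decompose_into_round_numbers
-- ===== SOURCE A (Python) =====
-- def decompose_into_round_numbers(n: int) -> list[int]:
--     """
--     Decomposes a given positive integer `n` into the minimum number of round numbers.
--
--     A round number is defined as a number of the form d00...0, where d is a digit from 1 to 9.
--
--     Parameters:
--     n (int): The positive integer to be decomposed.
--
--     Returns:
--     list[int]: A list of round numbers that sum up to `n`.
--     """
--     if n <= 9:
--         return [n]
--     else:
--         list1 = []
--         q = n // 10
--         r = n % 10
--         if r != 0: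
--             list1.append(r)
--         p = decompose_into_round_numbers(q)
--         for i in p:
--             list1.append(i * 10)
--         return list1
-- ===== SOURCE B (Python) =====
-- def decompose_into_round_numbers(n: int) -> list[int]:
--     if n <= 9:
--         return [n]
--     out = []
--     place = 1
--     while n > 0:
--         d = n % 10
--         if d != 0:
--             out.append(d * place)
--         place *= 10
--         n //= 10
--     return out
-- ===== Notes on version B (the rewrite author's own statement) =====
-- stated objective: simpler
-- what changed: Replaced the recursion (which maps the recursive result by *10 at every level, giving quadratic list traffic) with a single digit-peeling loop maintaining a place-value multiplier and appending d*place for nonzero digits.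
import Mathlib
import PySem

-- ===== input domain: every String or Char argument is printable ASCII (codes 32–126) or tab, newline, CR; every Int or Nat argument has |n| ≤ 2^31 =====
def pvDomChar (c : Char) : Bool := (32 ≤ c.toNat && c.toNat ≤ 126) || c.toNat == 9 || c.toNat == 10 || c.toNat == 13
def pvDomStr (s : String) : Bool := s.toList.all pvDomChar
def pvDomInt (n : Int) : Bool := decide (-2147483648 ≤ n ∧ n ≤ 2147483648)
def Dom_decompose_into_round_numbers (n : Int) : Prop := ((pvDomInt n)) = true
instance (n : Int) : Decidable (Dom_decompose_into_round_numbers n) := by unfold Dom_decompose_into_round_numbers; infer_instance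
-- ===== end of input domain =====

-- B replaces A's recursion (which re-scales every recursive result by *10) with one
-- digit-peeling loop carrying a place-value multiplier: simpler, one pass over the digits.

-- ===== PORT A =====
lemma pv_floordiv10_toNat_lt (n : Int) (h : ¬ n ≤ 9) :
    (PySem.Int.floordiv n 10).toNat < n.toNat := by
  rw [PySem.Int.floordiv_eq_ediv_of_pos (by omega)]
  omega

def decompose_into_round_numbers (n : Int) : List Int :=
  if h : n ≤ 9 then [n]
  else
    let q := PySem.Int.floordiv n 10
    let r := PySem.Int.mod n 10
    (if r ≠ 0 then [r] else []) ++ (decompose_into_round_numbers q).map (· * 10)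
termination_by n.toNat
decreasing_by exact pv_floordiv10_toNat_lt n h

-- ===== PORT B =====
lemma pv_floordiv10_toNat_lt' (n : Int) (h : 0 < n) :
    (PySem.Int.floordiv n 10).toNat < n.toNat := by
  rw [PySem.Int.floordiv_eq_ediv_of_pos (by omega)]
  omega

-- the while loop of Source B, with state (n, place); the produced list is opt-digit ++ rest
def pvRoundLoop (n place : Int) : List Int :=
  if h : 0 < n then
    let d := PySem.Int.mod n 10
    (if d ≠ 0 then [d * place] else []) ++ pvRoundLoop (PySem.Int.floordiv n 10) (place * 10)
  else []
termination_by n.toNat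
decreasing_by exact pv_floordiv10_toNat_lt' n h

def decompose_into_round_numbers_alt (n : Int) : List Int :=
  if n ≤ 9 then [n] else pvRoundLoop n 1

-- ===== PRECONDITION & SPEC =====
def Spec_decompose_into_round_numbers (n : Int) (out : List Int) : Prop := out = decompose_into_round_numbers_alt n
instance (n : Int) (out : List Int) : Decidable (Spec_decompose_into_round_numbers n out) := by unfold Spec_decompose_into_round_numbers; infer_instance

-- ===== CLAIM (what is proved, stated in full; the proofs are below) =====
def Claim_equal_decompose_into_round_numbers : Prop := ∀ (n : Int), Dom_decompose_into_round_numbers n → Spec_decompose_into_round_numbers n (decompose_into_round_numbers n)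

-- ===== LEMMAS AND PROOFS =====

lemma pvRoundLoop_pos (n place : Int) (h : 0 < n) :
    pvRoundLoop n place =
      (if PySem.Int.mod n 10 ≠ 0 then [PySem.Int.mod n 10 * place] else []) ++
        pvRoundLoop (PySem.Int.floordiv n 10) (place * 10) := by
  rw [pvRoundLoop]; simp [h]

lemma pvRoundLoop_nonpos (n place : Int) (h : ¬ 0 < n) : pvRoundLoop n place = [] := by
  rw [pvRoundLoop]; simp [h]

lemma pvRoundLoop_mul10 (n place : Int) :
    pvRoundLoop n (place * 10) = (pvRoundLoop n place).map (· * 10) := by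
  induction n, place using pvRoundLoop.induct with
  | case1 n place h ih =>
    rw [pvRoundLoop_pos _ _ h, pvRoundLoop_pos _ _ h, List.map_append]
    rw [mul_assoc] at ih ⊢
    rw [ih]
    split_ifs with hd
    · simp [mul_assoc]
    · simp
  | case2 n place h =>
    rw [pvRoundLoop_nonpos _ _ h, pvRoundLoop_nonpos _ _ h]; simp

lemma pv_main_aux : ∀ (k : Nat) (n : Int), n.toNat = k → 0 < n →
    decompose_into_round_numbers n = pvRoundLoop n 1 := by
  intro k
  induction k using Nat.strong_induction_on with
  | _ k ih =>
    intro n hk h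
    by_cases h9 : n ≤ 9
    · have hd : PySem.Int.mod n 10 = n := by
        rw [PySem.Int.mod_eq_emod_of_pos (by omega)]; omega
      have hq : PySem.Int.floordiv n 10 = 0 := by
        rw [PySem.Int.floordiv_eq_ediv_of_pos (by omega)]; omega
      have hn : n ≠ 0 := by omega
      rw [decompose_into_round_numbers, pvRoundLoop_pos _ _ h, hd, hq,
        pvRoundLoop_nonpos 0 (1 * 10) (by omega)]
      simp [h9, hn]
    · have hqpos : 0 < PySem.Int.floordiv n 10 := by
        rw [PySem.Int.floordiv_eq_ediv_of_pos (by omega)]; omega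
      have hrec := ih (PySem.Int.floordiv n 10).toNat
        (by rw [← hk]; exact pv_floordiv10_toNat_lt n h9)
        (PySem.Int.floordiv n 10) rfl hqpos
      rw [decompose_into_round_numbers, pvRoundLoop_pos _ _ h]
      simp only [h9, dite_false]
      rw [hrec, ← pvRoundLoop_mul10]
      split_ifs with hd
      · simp
      · simp

lemma pv_main (n : Int) (h : 0 < n) :
    decompose_into_round_numbers n = pvRoundLoop n 1 :=
  pv_main_aux n.toNat n rfl h

-- ===== VERDICT (by name: the statement is the Claim_ definition above) =====
theorem decompose_into_round_numbers_spec : Claim_equal_decompose_into_round_numbers := by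
  intro n _
  unfold Spec_decompose_into_round_numbers decompose_into_round_numbers_alt
  by_cases h : n ≤ 9
  · rw [decompose_into_round_numbers]; simp [h]
  · simp only [h, if_false]
    exact pv_main n (by omega)
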